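-- pv_equiv track=rewrite | github.com/maxblunck/irony_detection | src/pos_feature.py | __to_bigram_vector
-- ===== SOURCE A (Python) =====
-- def __to_bigram_vector(bag_of_bigrams, corpus): #corpus is the bigram_list
--     review_vector_list = []
--
--     for entry in corpus:
--         review_vector = []
--
--         for bigram in bag_of_bigrams:
--             review_vector.append(entry.count(bigram))
--
--         review_vector_list.append(review_vector)
--
--     return review_vector_list
-- ===== SOURCE B (Python) =====
-- def __to_bigram_vector(bag_of_bigrams, corpus):
--     # Inverted traversal: index each bigram's column positions once,
--     # then one pass over each entry incrementing matched columns.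
--     index = {}
--     for pos, bigram in enumerate(bag_of_bigrams):
--         index.setdefault(bigram, []).append(pos)
--     review_vector_list = []
--     for entry in corpus:
--         review_vector = [0] * len(bag_of_bigrams)
--         for elem in entry:
--             for pos in index.get(elem, []):
--                 review_vector[pos] += 1
--         review_vector_list.append(review_vector)
--     return review_vector_list
-- ===== Notes on version B (the rewrite author's own statement) =====
-- stated objective: faster
-- what changed: Instead of scanning the whole entry once per bigram (entry.count inside a nested loop), B builds a bigram->column-positions index once and makes a single pass over each entry, incrementing the matched columns.
import Mathlib
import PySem

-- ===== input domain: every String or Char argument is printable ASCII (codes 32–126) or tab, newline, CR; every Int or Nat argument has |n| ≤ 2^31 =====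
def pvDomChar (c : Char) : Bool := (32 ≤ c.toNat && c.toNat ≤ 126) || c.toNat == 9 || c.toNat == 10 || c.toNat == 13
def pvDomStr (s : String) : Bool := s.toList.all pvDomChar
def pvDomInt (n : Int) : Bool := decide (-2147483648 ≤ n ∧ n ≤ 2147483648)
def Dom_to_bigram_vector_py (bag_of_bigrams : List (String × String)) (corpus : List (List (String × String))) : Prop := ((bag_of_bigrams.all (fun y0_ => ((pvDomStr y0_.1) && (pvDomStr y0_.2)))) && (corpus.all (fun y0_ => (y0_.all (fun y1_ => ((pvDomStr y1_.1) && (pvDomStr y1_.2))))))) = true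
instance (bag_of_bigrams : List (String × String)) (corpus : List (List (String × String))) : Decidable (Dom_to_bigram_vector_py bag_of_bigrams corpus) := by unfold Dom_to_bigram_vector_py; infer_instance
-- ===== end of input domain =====

-- B inverts the traversal (bigram->column index built once, one pass per entry) instead of
-- scanning each entry once per bigram; return values proved equal.


-- ===== PORT A =====
-- for entry in corpus: review_vector = [entry.count(bigram) for bigram in bag]; append
def to_bigram_vector_py (bag_of_bigrams : List (String × String)) (corpus : List (List (String × String))) : List (List Int) :=
  corpus.foldl
    (fun review_vector_list entry =>
      review_vector_list ++
        [bag_of_bigrams.foldl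
          (fun review_vector bigram => review_vector ++ [(PySem.List.count entry bigram : Int)]) []])
    []

-- ===== PORT B =====
-- index.setdefault(bigram, []).append(pos) for pos, bigram in enumerate(bag_of_bigrams)
def pvBuildIndex : List (String × String) → Nat → PySem.Dict (String × String) (List Nat) → PySem.Dict (String × String) (List Nat)
  | [], _, d => d
  | b :: t, k, d => pvBuildIndex t (k + 1) (d.insert b (d.getD b [] ++ [k]))

-- review_vector[pos] += 1 for pos in ps; every pos produced by enumerate is in range,
-- where List.set / List.getD are exact for Python's vec[pos]
def pvIncr (v : List Int) (ps : List Nat) : List Int :=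
  ps.foldl (fun v p => v.set p (v.getD p 0 + 1)) v

def to_bigram_vector_py_alt (bag_of_bigrams : List (String × String)) (corpus : List (List (String × String))) : List (List Int) :=
  let index := pvBuildIndex bag_of_bigrams 0 PySem.Dict.empty
  corpus.foldl
    (fun review_vector_list entry =>
      review_vector_list ++
        [entry.foldl (fun review_vector elem => pvIncr review_vector (index.getD elem []))
          (List.replicate bag_of_bigrams.length 0)])
    []

-- ===== PRECONDITION & SPEC =====
def Spec_to_bigram_vector_py (bag_of_bigrams : List (String × String)) (corpus : List (List (String × String))) (out : List (List Int)) : Prop := out = to_bigram_vector_py_alt bag_of_bigrams corpus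
instance (bag_of_bigrams : List (String × String)) (corpus : List (List (String × String))) (out : List (List Int)) : Decidable (Spec_to_bigram_vector_py bag_of_bigrams corpus out) := by unfold Spec_to_bigram_vector_py; infer_instance

-- ===== CLAIM (what is proved, stated in full; the proofs are below) =====
def Claim_equal_to_bigram_vector_py : Prop := ∀ (bag_of_bigrams : List (String × String)) (corpus : List (List (String × String))), Dom_to_bigram_vector_py bag_of_bigrams corpus → Spec_to_bigram_vector_py bag_of_bigrams corpus (to_bigram_vector_py bag_of_bigrams corpus)

-- ===== LEMMAS AND PROOFS =====

-- the positions (from offset k) at which e occurs in bag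
def pvPosFrom (e : String × String) : List (String × String) → Nat → List Nat
  | [], _ => []
  | b :: t, k => (if b == e then [k] else []) ++ pvPosFrom e t (k + 1)

theorem pvBuildIndex_getD (e : String × String) :
    ∀ (bag : List (String × String)) (k : Nat) (d : PySem.Dict (String × String) (List Nat)),
      (pvBuildIndex bag k d).getD e [] = d.getD e [] ++ pvPosFrom e bag k := by
  intro bag
  induction bag with
  | nil => intro k d; simp [pvBuildIndex, pvPosFrom]
  | cons b t ih =>
    intro k d
    simp only [pvBuildIndex, pvPosFrom, ih]
    rw [PySem.Dict.getD_insert]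
    by_cases h : e = b
    · subst h
      simp
    · have hb : (b == e) = false := by
        simp only [beq_eq_false_iff_ne, ne_eq]
        exact fun h' => h h'.symm
      simp [h, hb]

theorem pvIncr_posFrom (e : String × String) :
    ∀ (bag : List (String × String)) (pre : List Int) (f : String × String → Int),
      pvIncr (pre ++ bag.map f) (pvPosFrom e bag pre.length)
        = pre ++ bag.map (fun b => if b == e then f b + 1 else f b) := by
  intro bag
  induction bag with
  | nil => intro pre f; simp [pvIncr, pvPosFrom]
  | cons b t ih =>
    intro pre f
    simp only [pvPosFrom, pvIncr, List.foldl_append, List.map_cons]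
    by_cases h : b = e
    · simp only [h, beq_self_eq_true, if_true, List.foldl_cons, List.foldl_nil]
      have hget : (pre ++ f e :: List.map f t).getD pre.length 0 = f e := by
        simp [List.getD_eq_getElem?_getD]
      have hset : (pre ++ f e :: List.map f t).set pre.length (f e + 1)
          = pre ++ (f e + 1) :: List.map f t := by
        simp
      rw [hget, hset]
      have := ih (pre ++ [f e + 1]) f
      simp only [List.length_append, List.length_cons, List.length_nil, Nat.zero_add,
        List.append_assoc, List.singleton_append] at this ⊢
      exact this
    · have hb : (b == e) = false := by
        simp only [beq_eq_false_iff_ne, ne_eq]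
        exact h
      simp only [hb]
      have := ih (pre ++ [f b]) f
      simp only [List.length_append, List.length_cons, List.length_nil, Nat.zero_add,
        List.append_assoc, List.singleton_append] at this ⊢
      exact this

theorem pvEntry_fold (bag : List (String × String)) :
    ∀ (entry : List (String × String)) (f : String × String → Int),
      entry.foldl (fun rv elem => pvIncr rv ((pvBuildIndex bag 0 PySem.Dict.empty).getD elem []))
          (bag.map f)
        = bag.map (fun b => f b + (entry.count b : Int)) := by
  intro entry
  induction entry with
  | nil => intro f; simp
  | cons e t ih =>
    intro f
    simp only [List.foldl_cons]
    rw [pvBuildIndex_getD, PySem.Dict.getD_empty, List.nil_append]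
    have hpos : pvIncr (bag.map f) (pvPosFrom e bag 0)
        = bag.map (fun b => if b == e then f b + 1 else f b) := by
      simpa using pvIncr_posFrom e bag [] f
    rw [hpos, ih]
    apply List.map_congr_left
    intro b _
    by_cases h : b = e
    · simp [h]
      ring
    · simp [h, Ne.symm h, beq_iff_eq]

-- ===== VERDICT (by name: the statement is the Claim_ definition above) =====
theorem to_bigram_vector_py_spec : Claim_equal_to_bigram_vector_py := by
  intro bag corpus _
  unfold Spec_to_bigram_vector_py to_bigram_vector_py to_bigram_vector_py_alt
  rw [PySem.List.foldl_append_singleton_eq_map, PySem.List.foldl_append_singleton_eq_map]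
  apply List.map_congr_left
  intro entry _
  have hz : List.replicate bag.length (0 : Int) = bag.map (fun _ => (0 : Int)) := by
    simp
  rw [hz, pvEntry_fold bag entry (fun _ => 0)]
  rw [PySem.List.foldl_append_singleton_eq_map]
  simp [PySem.List.count]
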